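-- pv_equiv track=rewrite | github.com/StefanLim0/mysql-er | sqlextractor/SqlExtractor.py | find_right_paren_pos
-- ===== SOURCE A (Python) =====
-- def find_right_paren_pos(content):
--     quoting = False
--     pre_slash = False
--     for i, char in enumerate(content):
--         if pre_slash:
--             char = '\\' + char
--             pre_slash = not pre_slash
--         if char == '"':
--             quoting = not quoting
--         elif char == '\\':
--             pre_slash = True
--         elif char == ')' and not quoting:
--             return i
--     return -1
-- ===== SOURCE B (Python) =====
-- def find_right_paren_pos(content):
--     # Two-stage approach: split the string on backslashes, so the escape logic
--     # reduces to per-segment bookkeeping (an escaped first char / an escaped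
--     # boundary backslash), then scan only within backslash-free segments.
--     segs = content.split('\\')
--     pos = 0
--     quoting = False
--     skip_first = False  # the backslash before this segment escapes its first char
--     for k, seg in enumerate(segs):
--         start = 1 if (skip_first and seg) else 0
--         for j in range(start, len(seg)):
--             c = seg[j]
--             if c == '"':
--                 quoting = not quoting
--             elif c == ')' and not quoting:
--                 return pos + j
--         if k + 1 < len(segs):
--             # the boundary backslash after an empty pending segment is itself escaped
--             skip_first = not (skip_first and not seg)
--         pos += len(seg) + 1
--     return -1
-- ===== Notes on version B (the rewrite author's own statement) =====
-- stated objective: alternative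
-- what changed: Replaces A's single char-by-char scan with a pre_slash carry flag by a two-stage method: split the string on backslashes first, then scan only inside the backslash-free segments, resolving escapes at segment boundaries (escaped first char / escaped boundary backslash).
import Mathlib
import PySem

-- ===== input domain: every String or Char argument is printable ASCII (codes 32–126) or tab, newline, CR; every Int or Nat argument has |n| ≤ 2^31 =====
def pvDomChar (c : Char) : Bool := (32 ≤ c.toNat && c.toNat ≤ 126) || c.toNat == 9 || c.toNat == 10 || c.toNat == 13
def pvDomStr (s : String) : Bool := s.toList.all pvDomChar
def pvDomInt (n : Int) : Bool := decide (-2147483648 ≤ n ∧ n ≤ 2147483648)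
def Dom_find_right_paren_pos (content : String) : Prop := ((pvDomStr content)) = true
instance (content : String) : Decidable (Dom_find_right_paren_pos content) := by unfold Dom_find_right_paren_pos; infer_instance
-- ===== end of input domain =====

-- B replaces A's single char-by-char scan (for-loop with a pre_slash carry flag) by a
-- two-stage method: split on backslashes first, then scan only inside the backslash-free
-- segments, resolving escapes at segment boundaries (objective: alternative decomposition).

-- ===== PORT A =====
-- A's for-loop over enumerate(content) with state (quoting, pre_slash).
-- When pre_slash is set, A rebinds char to the two-character string '\' + char, which can
-- equal none of '"', '\\', ')'; so that iteration only clears pre_slash and moves on.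
def goA : List Char → Nat → Bool → Bool → Int
  | [], _, _, _ => -1
  | _ :: rest, i, quoting, true => goA rest (i + 1) quoting false
  | c :: rest, i, quoting, false =>
    if c = '"' then goA rest (i + 1) (!quoting) false
    else if c = '\\' then goA rest (i + 1) quoting true
    else if c = ')' && !quoting then (i : Int)
    else goA rest (i + 1) quoting false

def find_right_paren_pos (content : String) : Int :=
  goA content.toList 0 false false

-- ===== PORT B =====
-- content.split('\\'): Python str.split with a one-character separator, ported by hand,
-- step for step (exact: splits at every backslash, keeping empty pieces).
def pySplitBS : List Char → List (List Char)
  | [] => [[]]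
  | c :: rest =>
    match pySplitBS rest with
    | [] => [[]]  -- unreachable: pySplitBS always returns a nonempty list
    | s :: ss => if c = '\\' then [] :: s :: ss else (c :: s) :: ss

-- Source B's inner for-loop over one backslash-free segment: returns the found absolute
-- position, or the quoting state at the segment's end.
def scanSeg : List Char → Nat → Bool → Option Nat × Bool
  | [], _, q => (none, q)
  | c :: rest, pos, q =>
    if c = '"' then scanSeg rest (pos + 1) (!q)
    else if c = ')' && !q then (some pos, q)
    else scanSeg rest (pos + 1) q

-- Source B's outer for-loop over the segments with state (pos, quoting, skip_first).
def goSegs : List (List Char) → Nat → Bool → Bool → Int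
  | [], _, _, _ => -1
  | seg :: rest, pos, q, skip =>
    let start : Nat := if skip && !seg.isEmpty then 1 else 0
    match scanSeg (seg.drop start) (pos + start) q with
    | (some p, _) => (p : Int)
    | (none, q') => goSegs rest (pos + seg.length + 1) q' (!(skip && seg.isEmpty))

def find_right_paren_pos_alt (content : String) : Int :=
  goSegs (pySplitBS content.toList) 0 false false

-- ===== PRECONDITION & SPEC =====
def Spec_find_right_paren_pos (content : String) (out : Int) : Prop := out = find_right_paren_pos_alt content
instance (content : String) (out : Int) : Decidable (Spec_find_right_paren_pos content out) := by unfold Spec_find_right_paren_pos; infer_instance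

-- ===== CLAIM (what is proved, stated in full; the proofs are below) =====
def Claim_equal_find_right_paren_pos : Prop := ∀ (content : String), Dom_find_right_paren_pos content → Spec_find_right_paren_pos content (find_right_paren_pos content)

-- ===== LEMMAS AND PROOFS =====

theorem pySplitBS_ne_nil (cs : List Char) : pySplitBS cs ≠ [] := by
  cases cs with
  | nil => simp [pySplitBS]
  | cons c rest =>
    simp only [pySplitBS]
    split
    · simp
    · split
      · simp
      · simp

-- goSegs on an empty first segment: only the boundary backslash's escape status flips
theorem goSegs_nil_seg (ss : List (List Char)) (pos : Nat) (q skip : Bool) :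
    goSegs ([] :: ss) pos q skip = goSegs ss (pos + 1) q (!skip) := by
  cases skip <;> simp [goSegs, scanSeg]

-- goSegs with skip_first clear is the inner scan followed by the rest
theorem goSegs_eq_scan (s : List Char) (ss : List (List Char)) (pos : Nat) (q : Bool) :
    goSegs (s :: ss) pos q false =
      match scanSeg s pos q with
      | (some p, _) => (p : Int)
      | (none, q') => goSegs ss (pos + s.length + 1) q' true := by
  simp [goSegs]

-- goSegs with skip_first set ignores the first character of a nonempty segment
theorem goSegs_skip (c : Char) (s : List Char) (ss : List (List Char)) (pos : Nat) (q : Bool) :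
    goSegs ((c :: s) :: ss) pos q true = goSegs (s :: ss) (pos + 1) q false := by
  rw [goSegs_eq_scan]
  simp only [goSegs, List.isEmpty_cons, Bool.not_false, Bool.and_true,
    List.length_cons, Bool.and_false]
  have h : pos + (s.length + 1) + 1 = pos + 1 + s.length + 1 := by omega
  rw [h]
  simp

-- goSegs stepping past a live (unescaped) head character of the first segment
theorem goSegs_live (c : Char) (s : List Char) (ss : List (List Char)) (pos : Nat) (q : Bool) :
    goSegs ((c :: s) :: ss) pos q false =
      if c = '"' then goSegs (s :: ss) (pos + 1) (!q) false
      else if c = ')' ∧ q = false then (pos : Int)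
      else goSegs (s :: ss) (pos + 1) q false := by
  rw [goSegs_eq_scan]
  have h : pos + (c :: s).length + 1 = pos + 1 + s.length + 1 := by simp; omega
  rw [h]
  by_cases hq : c = '"'
  · subst hq
    rw [if_pos rfl, goSegs_eq_scan]
    simp [scanSeg]
  · by_cases hp : c = ')' ∧ q = false
    · obtain ⟨h1, h2⟩ := hp; subst h1; subst h2
      simp [scanSeg, hq]
    · rw [if_neg hq, if_neg hp, goSegs_eq_scan]
      have hscan : scanSeg (c :: s) pos q = scanSeg s (pos + 1) q := by
        simp only [scanSeg, if_neg hq]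
        rw [if_neg]
        simp only [Bool.and_eq_true, decide_eq_true_eq, Bool.not_eq_true']
        exact hp
      rw [hscan]

theorem main_lemma (cs : List Char) :
    ∀ (pos : Nat) (q skip : Bool), goA cs pos q skip = goSegs (pySplitBS cs) pos q skip := by
  induction cs with
  | nil =>
    intro pos q skip
    cases skip <;> simp [goA, pySplitBS, goSegs, scanSeg]
  | cons c rest ih =>
    intro pos q skip
    rcases hsplit : pySplitBS rest with _ | ⟨s, ss⟩
    · exact absurd hsplit (pySplitBS_ne_nil rest)
    by_cases hc : c = '\\'
    · subst hc
      have hb : pySplitBS ('\\' :: rest) = [] :: s :: ss := by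
        simp [pySplitBS, hsplit]
      rw [hb, goSegs_nil_seg, ← hsplit]
      cases skip
      · show goA rest (pos + 1) q true = _
        exact ih (pos + 1) q true
      · show goA rest (pos + 1) q false = _
        exact ih (pos + 1) q false
    · have hb : pySplitBS (c :: rest) = (c :: s) :: ss := by
        simp [pySplitBS, hsplit, hc]
      rw [hb]
      cases skip
      · rw [goSegs_live]
        by_cases hq : c = '"'
        · subst hq
          show goA rest (pos + 1) (!q) false = _
          rw [if_pos rfl, ← hsplit]
          exact ih (pos + 1) (!q) false
        · by_cases hp : c = ')' ∧ q = false
          · obtain ⟨h1, h2⟩ := hp; subst h1; subst h2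
            simp [goA, hq]
          · have hA : goA (c :: rest) pos q false = goA rest (pos + 1) q false := by
              simp only [goA, if_neg hq, if_neg hc]
              rw [if_neg]
              simp only [Bool.and_eq_true, decide_eq_true_eq, Bool.not_eq_true']
              exact hp
            rw [hA, if_neg hq, if_neg hp, ← hsplit]
            exact ih (pos + 1) q false
      · rw [goSegs_skip, ← hsplit]
        show goA rest (pos + 1) q false = _
        exact ih (pos + 1) q false

-- ===== VERDICT (by name: the statement is the Claim_ definition above) =====
theorem find_right_paren_pos_spec : Claim_equal_find_right_paren_pos := by
  intro content _
  unfold Spec_find_right_paren_pos find_right_paren_pos find_right_paren_pos_alt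
  exact main_lemma content.toList 0 false false
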